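-- pv_equiv track=rewrite | github.com/DylanPKing/fyp-backend | autodjbackend/playlist_generator.py | _bucket_tracks_by_h_value
-- ===== SOURCE A (Python) =====
-- def _bucket_tracks_by_h_value(heuristic_dict):
--     h_buckets = {}
--
--     for uuid, h_value in heuristic_dict.items():
--         try:
--             h_buckets[h_value].append(uuid)
--         except KeyError:
--             h_buckets[h_value] = [uuid]
--
--     return h_buckets
-- ===== SOURCE B (Python) =====
-- def _bucket_tracks_by_h_value(heuristic_dict):
--     items = list(heuristic_dict.items())
--     order = list(dict.fromkeys(h for _, h in items))
--     return {h: [u for u, v in items if v == h] for h in order}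
-- ===== Notes on version B (the rewrite author's own statement) =====
-- stated objective: alternative
-- what changed: Replaces the single-pass try/except bucket-append loop with a two-phase build: dedup the heuristic values in first-occurrence order, then a dict comprehension that collects each bucket by a filtering scan.
import Mathlib
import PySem

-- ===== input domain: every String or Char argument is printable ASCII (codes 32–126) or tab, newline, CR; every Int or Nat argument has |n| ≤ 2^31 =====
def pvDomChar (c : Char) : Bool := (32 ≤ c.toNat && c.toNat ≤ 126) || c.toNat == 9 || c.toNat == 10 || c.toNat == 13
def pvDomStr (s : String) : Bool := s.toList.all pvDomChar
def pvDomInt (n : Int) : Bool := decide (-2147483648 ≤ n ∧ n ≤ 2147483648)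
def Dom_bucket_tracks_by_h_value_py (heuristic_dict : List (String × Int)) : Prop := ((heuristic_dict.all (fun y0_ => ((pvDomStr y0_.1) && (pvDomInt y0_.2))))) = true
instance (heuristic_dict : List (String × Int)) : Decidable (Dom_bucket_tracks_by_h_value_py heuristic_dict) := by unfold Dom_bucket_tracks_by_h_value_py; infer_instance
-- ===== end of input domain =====

-- B groups by a dedup-then-filter comprehension instead of A's incremental bucket-append loop; alternative decomposition, same values.

-- ===== PORT A =====
-- the try/append/except-insert body is exactly 'h_buckets[h_value] = h_buckets.get(h_value, []) + [uuid]', i.e. Dict.modify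
def bucket_tracks_by_h_value_py (heuristic_dict : List (String × Int)) : List (Int × List String) :=
  (heuristic_dict.foldl (fun d p => d.modify p.2 [] (· ++ [p.1])) PySem.Dict.empty).items

-- ===== PORT B =====
def bucket_tracks_by_h_value_py_alt (heuristic_dict : List (String × Int)) : List (Int × List String) :=
  (PySem.List.dedup (heuristic_dict.map (fun p => p.2))).map
    (fun h => (h, (heuristic_dict.filter (fun p => p.2 == h)).map (fun p => p.1)))

-- ===== PRECONDITION & SPEC =====
def Spec_bucket_tracks_by_h_value_py (heuristic_dict : List (String × Int)) (out : List (Int × List String)) : Prop := out = bucket_tracks_by_h_value_py_alt heuristic_dict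
instance (heuristic_dict : List (String × Int)) (out : List (Int × List String)) : Decidable (Spec_bucket_tracks_by_h_value_py heuristic_dict out) := by unfold Spec_bucket_tracks_by_h_value_py; infer_instance

-- ===== CLAIM (what is proved, stated in full; the proofs are below) =====
def Claim_equal_bucket_tracks_by_h_value_py : Prop := ∀ (heuristic_dict : List (String × Int)), Dom_bucket_tracks_by_h_value_py heuristic_dict → Spec_bucket_tracks_by_h_value_py heuristic_dict (bucket_tracks_by_h_value_py heuristic_dict)

-- ===== LEMMAS AND PROOFS =====

theorem bucket_main (hd : List (String × Int)) :
    bucket_tracks_by_h_value_py hd = bucket_tracks_by_h_value_py_alt hd := by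
  unfold bucket_tracks_by_h_value_py bucket_tracks_by_h_value_py_alt
  set d := hd.foldl (fun d p => d.modify p.2 ([] : List String) (· ++ [p.1])) PySem.Dict.empty with hdval
  have hnd : d.keys.Nodup := by
    simpa using PySem.Dict.nodup_keys_foldl_modify_key hd (fun p => p.2) [] (fun _ p => (· ++ [p.1]))
      PySem.Dict.empty (by simp [PySem.Dict.keys_empty])
  have hkeys : d.keys = PySem.List.dedup (hd.map (fun p => p.2)) := by
    rw [hdval, PySem.Dict.keys_foldl_modify_key]
    simp [PySem.Dict.keys_empty, PySem.List.dedup_eq_ofList, PySem.Set.update, PySem.Set.ofList_eq_foldl]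
  have hswap : d = (hd.map (fun p => (p.2, p.1))).foldl
      (fun d q => d.modify q.1 ([] : List String) (· ++ [q.2])) PySem.Dict.empty := by
    rw [hdval, List.foldl_map]
  have hgetD : ∀ k : Int, d.getD k [] = (hd.filter (fun p => p.2 == k)).map (fun p => p.1) := by
    intro k
    rw [hswap, PySem.Dict.getD_foldl_modify_append]
    simp [PySem.Dict.getD_empty, List.filter_map, List.map_map, Function.comp_def]
  rw [PySem.Dict.items_eq_map_keys d hnd ([] : List String), hkeys]
  exact List.map_congr_left (fun k _ => by rw [hgetD k])

-- ===== VERDICT (by name: the statement is the Claim_ definition above) =====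
theorem bucket_tracks_by_h_value_py_spec : Claim_equal_bucket_tracks_by_h_value_py := by
  intro hd _
  unfold Spec_bucket_tracks_by_h_value_py
  exact bucket_main hd
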